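-- pv_equiv track=rewrite | github.com/xtolly/layout-rag | src/layout_rag/services/layout_service.py | calculate_diff_info
-- ===== SOURCE A (Python) =====
-- def calculate_diff_info(query_parts: list, template_parts: list) -> dict:
--     """计算零件组成差异（matched / extra / missing）。"""
--     q_counts: dict = {}
--     for p in query_parts:
--         pt = p.get("part_type")
--         q_counts[pt] = q_counts.get(pt, 0) + 1
--
--     t_counts: dict = {}
--     for p in template_parts:
--         pt = p.get("part_type")
--         t_counts[pt] = t_counts.get(pt, 0) + 1
--
--     all_types = set(list(q_counts.keys()) + list(t_counts.keys()))
--     matched = extra = missing = 0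
--     for pt in all_types:
--         qc, tc = q_counts.get(pt, 0), t_counts.get(pt, 0)
--         matched += min(qc, tc)
--         if qc > tc:
--             extra   += qc - tc
--         if tc > qc:
--             missing += tc - qc
--     return {"matched": matched, "extra": extra, "missing": missing}
-- ===== SOURCE B (Python) =====
-- def calculate_diff_info(query_parts: list, template_parts: list) -> dict:
--     """Greedy one-pass matching against remaining template counts; extra/missing from list sizes."""
--     remaining = {}
--     for p in template_parts:
--         pt = p.get("part_type")
--         remaining[pt] = remaining.get(pt, 0) + 1
--     matched = 0
--     for p in query_parts:
--         pt = p.get("part_type")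
--         if remaining.get(pt, 0) > 0:
--             remaining[pt] -= 1
--             matched += 1
--     return {"matched": matched,
--             "extra": len(query_parts) - matched,
--             "missing": len(template_parts) - matched}
-- ===== Notes on version B (the rewrite author's own statement) =====
-- stated objective: simpler
-- what changed: Replaces A's two counter dicts plus a union-of-types loop computing min/surplus/deficit per type by a single template counter and a greedy one-pass matching over query_parts that decrements remaining counts; extra and missing fall out as len(query_parts)-matched and len(template_parts)-matched.
import Mathlib
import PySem

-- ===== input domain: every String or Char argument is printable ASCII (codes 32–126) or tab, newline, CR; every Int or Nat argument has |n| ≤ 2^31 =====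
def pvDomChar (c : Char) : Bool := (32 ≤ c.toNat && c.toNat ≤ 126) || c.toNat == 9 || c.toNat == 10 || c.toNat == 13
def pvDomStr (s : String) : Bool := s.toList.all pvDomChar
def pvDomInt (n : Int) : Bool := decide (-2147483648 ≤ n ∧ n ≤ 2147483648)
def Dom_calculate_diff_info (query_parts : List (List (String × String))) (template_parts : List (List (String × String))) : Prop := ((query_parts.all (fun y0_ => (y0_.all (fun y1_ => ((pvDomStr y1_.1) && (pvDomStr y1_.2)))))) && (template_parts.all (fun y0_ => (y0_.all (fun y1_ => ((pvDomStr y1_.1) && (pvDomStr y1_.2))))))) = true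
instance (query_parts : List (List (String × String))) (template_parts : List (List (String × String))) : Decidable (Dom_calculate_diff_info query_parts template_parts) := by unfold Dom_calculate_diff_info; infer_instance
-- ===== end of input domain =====

-- B replaces A's union-of-types comparison loop with a greedy one-pass matching
-- against remaining template counts; extra/missing follow from the list sizes (objective: simpler).


-- ===== PORT A =====
-- p.get("part_type") on the part dict (assoc list under the type convention)
def pvPartType (p : List (String × String)) : Option String :=
  (PySem.Dict.ofList p).get? "part_type"

-- q_counts / t_counts builder: `counts[pt] = counts.get(pt, 0) + 1` over a list of parts
def pvCountTypes (parts : List (List (String × String))) : PySem.Dict (Option String) Int :=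
  parts.foldl (fun d p => d.insert (pvPartType p) (d.getD (pvPartType p) 0 + 1)) PySem.Dict.empty

def calculate_diff_info (query_parts : List (List (String × String))) (template_parts : List (List (String × String))) : List (String × Int) :=
  let q_counts := pvCountTypes query_parts
  let t_counts := pvCountTypes template_parts
  let all_types : PySem.Set (Option String) := PySem.Set.ofList (q_counts.keys ++ t_counts.keys)
  -- the for-loop over all_types with the three accumulators (result is order-independent: sums)
  let acc := all_types.foldl (fun (acc : Int × Int × Int) pt =>
      let qc := q_counts.getD pt 0
      let tc := t_counts.getD pt 0
      (acc.1 + min qc tc,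
       acc.2.1 + (if qc > tc then qc - tc else 0),
       acc.2.2 + (if tc > qc then tc - qc else 0))) (0, 0, 0)
  [("matched", acc.1), ("extra", acc.2.1), ("missing", acc.2.2)]

-- ===== PORT B =====
def calculate_diff_info_alt (query_parts : List (List (String × String))) (template_parts : List (List (String × String))) : List (String × Int) :=
  let remaining := template_parts.foldl
      (fun d p => d.insert (pvPartType p) (d.getD (pvPartType p) 0 + 1)) PySem.Dict.empty
  -- greedy pass over query_parts, decrementing remaining counts
  let st := query_parts.foldl
      (fun (st : PySem.Dict (Option String) Int × Int) p =>
        let pt := pvPartType p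
        if st.1.getD pt 0 > 0 then (st.1.insert pt (st.1.getD pt 0 - 1), st.2 + 1) else st)
      (remaining, 0)
  [("matched", st.2),
   ("extra", (query_parts.length : Int) - st.2),
   ("missing", (template_parts.length : Int) - st.2)]

-- ===== PRECONDITION & SPEC =====
def Spec_calculate_diff_info (query_parts : List (List (String × String))) (template_parts : List (List (String × String))) (out : List (String × Int)) : Prop := out = calculate_diff_info_alt query_parts template_parts
instance (query_parts : List (List (String × String))) (template_parts : List (List (String × String))) (out : List (String × Int)) : Decidable (Spec_calculate_diff_info query_parts template_parts out) := by unfold Spec_calculate_diff_info; infer_instance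

-- ===== CLAIM (what is proved, stated in full; the proofs are below) =====
def Claim_equal_calculate_diff_info : Prop := ∀ (query_parts : List (List (String × String))) (template_parts : List (List (String × String))), Dom_calculate_diff_info query_parts template_parts → Spec_calculate_diff_info query_parts template_parts (calculate_diff_info query_parts template_parts)

-- ===== LEMMAS AND PROOFS =====

-- the list of part types of a parts list
def pvKeysOf (parts : List (List (String × String))) : List (Option String) :=
  parts.map pvPartType

-- counter fold over an arbitrary starting dict
lemma pvCountAux (ks : List (Option String)) :
    ∀ (d : PySem.Dict (Option String) Int) (k : Option String),
      (ks.foldl (fun d pt => d.insert pt (d.getD pt 0 + 1)) d).getD k 0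
      = d.getD k 0 + (ks.count k : Int) := by
  induction ks with
  | nil => simp
  | cons a t ih =>
    intro d k
    simp only [List.foldl_cons, ih, PySem.Dict.getD_insert, List.count_cons]
    by_cases h : k = a
    · subst h; simp; ring
    · simp [h, Ne.symm h]

-- the counter dict counts occurrences of each type
lemma pvCount_getD (parts : List (List (String × String))) (k : Option String) :
    (pvCountTypes parts).getD k 0 = ((pvKeysOf parts).count k : Int) := by
  unfold pvCountTypes pvKeysOf
  rw [← List.foldl_map (f := pvPartType)
    (g := fun (d : PySem.Dict (Option String) Int) pt => d.insert pt (d.getD pt 0 + 1))]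
  rw [pvCountAux]
  simp [PySem.Dict.getD_empty]

lemma pvCountKeysAux (ks : List (Option String)) :
    ∀ (d : PySem.Dict (Option String) Int) (k : Option String),
      (k ∈ (ks.foldl (fun d pt => d.insert pt (d.getD pt 0 + 1)) d).keys ↔ k ∈ d.keys ∨ k ∈ ks) := by
  induction ks with
  | nil => simp
  | cons a t ih =>
    intro d k
    simp only [List.foldl_cons, ih, PySem.Dict.mem_keys_insert, List.mem_cons]
    tauto

lemma pvCount_keys_mem (parts : List (List (String × String))) (k : Option String) :
    k ∈ (pvCountTypes parts).keys ↔ k ∈ pvKeysOf parts := by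
  unfold pvCountTypes pvKeysOf
  rw [← List.foldl_map (f := pvPartType)
    (g := fun (d : PySem.Dict (Option String) Int) pt => d.insert pt (d.getD pt 0 + 1))]
  rw [pvCountKeysAux]
  simp [PySem.Dict.keys_empty]

-- generic triple-accumulator fold = componentwise sums
lemma pvTripleFold (L : List (Option String)) (f1 f2 f3 : Option String → Int) :
    ∀ (a b c : Int),
      L.foldl (fun (acc : Int × Int × Int) pt =>
        (acc.1 + f1 pt, acc.2.1 + f2 pt, acc.2.2 + f3 pt)) (a, b, c)
      = (a + (L.map f1).sum, b + (L.map f2).sum, c + (L.map f3).sum) := by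
  induction L with
  | nil => simp
  | cons x t ih =>
    intro a b c
    simp only [List.foldl_cons, ih, List.map_cons, List.sum_cons]
    refine Prod.ext (by ring) (Prod.ext (by ring) (by ring))

-- greedy fold invariant
lemma pvGreedy (ks : List (Option String)) (K : Finset (Option String))
    (hsub : ∀ k ∈ ks, k ∈ K) :
    ∀ (d : PySem.Dict (Option String) Int) (m : Int),
      (ks.foldl (fun (st : PySem.Dict (Option String) Int × Int) pt =>
          if st.1.getD pt 0 > 0 then (st.1.insert pt (st.1.getD pt 0 - 1), st.2 + 1) else st)
        (d, m)).2
      = m + ∑ k ∈ K, ((min (ks.count k) (d.getD k 0).toNat : Nat) : Int) := by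
  induction ks with
  | nil => simp
  | cons a t ih =>
    intro d m
    have ha : a ∈ K := hsub a (by simp)
    have hsub' : ∀ k ∈ t, k ∈ K := fun k hk => hsub k (by simp [hk])
    have key : ∀ (d' : PySem.Dict (Option String) Int),
        (∀ k, k ≠ a → d'.getD k 0 = d.getD k 0) →
        ∑ k ∈ K.erase a, ((min (t.count k) (d'.getD k 0).toNat : Nat) : Int)
        = ∑ k ∈ K.erase a, ((min ((a :: t).count k) (d.getD k 0).toNat : Nat) : Int) := by
      intro d' hd'
      refine Finset.sum_congr rfl ?_
      intro k hk
      have hne : k ≠ a := (Finset.mem_erase.mp hk).1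
      rw [hd' k hne]; simp [List.count_cons, if_neg (Ne.symm hne)]
    simp only [List.foldl_cons]
    by_cases h : d.getD a 0 > 0
    · rw [if_pos h]
      rw [ih hsub' (d.insert a (d.getD a 0 - 1)) (m + 1)]
      rw [← Finset.add_sum_erase K _ ha, ← Finset.add_sum_erase K _ ha]
      rw [key (d.insert a (d.getD a 0 - 1))
        (fun k hk => by simp [PySem.Dict.getD_insert, hk])]
      have h1 : ((d.insert a (d.getD a 0 - 1)).getD a 0) = d.getD a 0 - 1 :=
        PySem.Dict.getD_insert_self _ _ _ _
      rw [h1, List.count_cons_self]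
      have h2 : min (t.count a + 1) (d.getD a 0).toNat = min (t.count a) (d.getD a 0 - 1).toNat + 1 := by
        omega
      rw [h2]
      push_cast
      ring
    · rw [if_neg h]
      rw [ih hsub' d m]
      rw [← Finset.add_sum_erase K _ ha, ← Finset.add_sum_erase K _ ha]
      rw [key d (fun _ _ => rfl)]
      have h0 : (d.getD a 0).toNat = 0 := by omega
      rw [List.count_cons_self, h0]
      simp

-- count with Option's structural BEq equals count with the decidable-equality BEq
lemma pvCountBEq (ks : List (Option String)) (k : Option String) :
    ks.count k = @List.count (Option String) instBEqOfDecidableEq k ks := by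
  induction ks with
  | nil => rfl
  | cons a t ih => simp only [List.count_cons, ih]; congr 1; simp [beq_iff_eq]

-- sum of counts over any nodup superset of the support is the length
lemma pvSumCount (ks : List (Option String)) (K : Finset (Option String))
    (hsub : ∀ k ∈ ks, k ∈ K) :
    ∑ k ∈ K, ((ks.count k : Nat) : Int) = (ks.length : Int) := by
  have h1 : ∑ k ∈ ks.toFinset, ((ks.count k : Nat) : Int) = (ks.length : Int) := by
    rw [← Nat.cast_sum]
    simp only [pvCountBEq]
    exact_mod_cast congrArg (Nat.cast : Nat → Int) (List.sum_toFinset_count_eq_length ks)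
  rw [← h1]
  refine (Finset.sum_subset ?_ ?_).symm
  · intro k hk
    exact hsub k (List.mem_toFinset.mp hk)
  · intro k _ hk
    have : k ∉ ks := fun h => hk (List.mem_toFinset.mpr h)
    simp [List.count_eq_zero_of_not_mem this]

-- ===== VERDICT (by name: the statement is the Claim_ definition above) =====
theorem calculate_diff_info_spec : Claim_equal_calculate_diff_info := by
  intro qps tps _
  unfold Spec_calculate_diff_info
  -- notation
  set qk := pvKeysOf qps with hqk
  set tk := pvKeysOf tps with htk
  set S : List (Option String) :=
    PySem.Set.ofList ((pvCountTypes qps).keys ++ (pvCountTypes tps).keys) with hS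
  have hSnodup : S.Nodup := PySem.Set.nodup_ofList _
  have hmemS : ∀ k, k ∈ S ↔ k ∈ qk ∨ k ∈ tk := by
    intro k
    rw [hS, PySem.Set.mem_ofList, List.mem_append,
      pvCount_keys_mem, pvCount_keys_mem]
  have hsubq : ∀ k ∈ qk, k ∈ S.toFinset := fun k hk =>
    List.mem_toFinset.mpr ((hmemS k).mpr (Or.inl hk))
  have hsubt : ∀ k ∈ tk, k ∈ S.toFinset := fun k hk =>
    List.mem_toFinset.mpr ((hmemS k).mpr (Or.inr hk))
  -- per-type counts, as integers
  have hQ : ∀ k, (pvCountTypes qps).getD k 0 = ((qk.count k : Nat) : Int) :=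
    fun k => pvCount_getD qps k
  have hT : ∀ k, (pvCountTypes tps).getD k 0 = ((tk.count k : Nat) : Int) :=
    fun k => pvCount_getD tps k
  -- A's three sums
  have hA : calculate_diff_info qps tps =
      [("matched", ∑ k ∈ S.toFinset,
          min (((qk.count k : Nat) : Int)) (((tk.count k : Nat) : Int))),
       ("extra", ∑ k ∈ S.toFinset,
          (if ((qk.count k : Nat) : Int) > ((tk.count k : Nat) : Int)
           then ((qk.count k : Nat) : Int) - ((tk.count k : Nat) : Int) else 0)),
       ("missing", ∑ k ∈ S.toFinset,
          (if ((tk.count k : Nat) : Int) > ((qk.count k : Nat) : Int)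
           then ((tk.count k : Nat) : Int) - ((qk.count k : Nat) : Int) else 0))] := by
    unfold calculate_diff_info
    dsimp only
    rw [pvTripleFold S
      (fun pt => min ((pvCountTypes qps).getD pt 0) ((pvCountTypes tps).getD pt 0))
      (fun pt => if (pvCountTypes qps).getD pt 0 > (pvCountTypes tps).getD pt 0
        then (pvCountTypes qps).getD pt 0 - (pvCountTypes tps).getD pt 0 else 0)
      (fun pt => if (pvCountTypes tps).getD pt 0 > (pvCountTypes qps).getD pt 0
        then (pvCountTypes tps).getD pt 0 - (pvCountTypes qps).getD pt 0 else 0)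
      0 0 0]
    simp only [zero_add]
    rw [← List.sum_toFinset _ hSnodup, ← List.sum_toFinset _ hSnodup,
      ← List.sum_toFinset _ hSnodup]
    simp only [hQ, hT]
  -- B's greedy matched count
  have hB : calculate_diff_info_alt qps tps =
      [("matched", ∑ k ∈ S.toFinset, ((min (qk.count k) (tk.count k) : Nat) : Int)),
       ("extra", (qps.length : Int)
          - ∑ k ∈ S.toFinset, ((min (qk.count k) (tk.count k) : Nat) : Int)),
       ("missing", (tps.length : Int)
          - ∑ k ∈ S.toFinset, ((min (qk.count k) (tk.count k) : Nat) : Int))] := by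
    unfold calculate_diff_info_alt
    dsimp only
    rw [show (tps.foldl (fun d p => d.insert (pvPartType p) (d.getD (pvPartType p) 0 + 1))
        PySem.Dict.empty) = pvCountTypes tps from rfl]
    rw [← List.foldl_map (f := pvPartType)
      (g := fun (st : PySem.Dict (Option String) Int × Int) pt =>
        if st.1.getD pt 0 > 0 then (st.1.insert pt (st.1.getD pt 0 - 1), st.2 + 1) else st)]
    rw [pvGreedy (qps.map pvPartType) S.toFinset (by exact_mod_cast hsubq) (pvCountTypes tps) 0]
    have : ∀ k, ((pvCountTypes tps).getD k 0).toNat = tk.count k := by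
      intro k; rw [hT k]; exact Int.toNat_natCast _
    simp only [this, zero_add, hqk, pvKeysOf]
  rw [hA, hB]
  -- the three components agree
  have hmatch : ∀ k, min (((qk.count k : Nat) : Int)) (((tk.count k : Nat) : Int))
      = ((min (qk.count k) (tk.count k) : Nat) : Int) := by
    intro k; omega
  have hmatchsum : ∑ k ∈ S.toFinset,
      min (((qk.count k : Nat) : Int)) (((tk.count k : Nat) : Int))
      = ∑ k ∈ S.toFinset, ((min (qk.count k) (tk.count k) : Nat) : Int) :=
    Finset.sum_congr rfl (fun k _ => hmatch k)
  have hqlen : ∑ k ∈ S.toFinset, ((qk.count k : Nat) : Int) = (qps.length : Int) := by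
    rw [pvSumCount qk S.toFinset hsubq, hqk]; simp [pvKeysOf]
  have htlen : ∑ k ∈ S.toFinset, ((tk.count k : Nat) : Int) = (tps.length : Int) := by
    rw [pvSumCount tk S.toFinset hsubt, htk]; simp [pvKeysOf]
  have hextra : ∑ k ∈ S.toFinset,
      (if ((qk.count k : Nat) : Int) > ((tk.count k : Nat) : Int)
       then ((qk.count k : Nat) : Int) - ((tk.count k : Nat) : Int) else 0)
      = (qps.length : Int) - ∑ k ∈ S.toFinset, ((min (qk.count k) (tk.count k) : Nat) : Int) := by
    rw [← hqlen, ← Finset.sum_sub_distrib]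
    refine Finset.sum_congr rfl ?_
    intro k _
    have := hmatch k
    split_ifs <;> omega
  have hmissing : ∑ k ∈ S.toFinset,
      (if ((tk.count k : Nat) : Int) > ((qk.count k : Nat) : Int)
       then ((tk.count k : Nat) : Int) - ((qk.count k : Nat) : Int) else 0)
      = (tps.length : Int) - ∑ k ∈ S.toFinset, ((min (qk.count k) (tk.count k) : Nat) : Int) := by
    rw [← htlen, ← Finset.sum_sub_distrib]
    refine Finset.sum_congr rfl ?_
    intro k _
    have := hmatch k
    split_ifs <;> omega
  rw [hmatchsum, hextra, hmissing]
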